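-- pv_equiv track=rewrite | github.com/DarlingtonDeveloper/wa-monitoring-agent | src/score/keyword_scorer.py | apply_false_positive_rules
-- ===== SOURCE A (Python) =====
-- def apply_false_positive_rules(item: dict) -> bool:
--     """
--     Implements Section 5.3 of the monitoring briefing.
--     Returns False if the item is a false positive.
--     """
--     text = f"{item.get('title', '')} {item.get('content', '')}".lower()
--
--     # "RWE" in pharma context = false positive
--     if "rwe" in text and "real-world evidence" in text:
--         if not any(kw in text for kw in ["energy", "wind", "power", "renewable", "electricity"]):
--             return False
--
--     # Ambiguous project names without qualifiers
--     AMBIGUOUS = {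
--         "sofia": ["wind", "rwe", "offshore", "dogger bank", "turbine"],
--         "raspberry": ["wind", "rwe", "solar", "energy", "cfd"],
--         "belvoir": ["wind", "rwe", "solar", "energy", "cfd"],
--     }
--     for name, qualifiers in AMBIGUOUS.items():
--         if name in text and not any(q in text for q in qualifiers):
--             return False
--
--     return True
-- ===== SOURCE B (Python) =====
-- # B: one position-major scan of the text collects which vocabulary keywords occur
-- # (instead of one substring search per keyword); rules are then evaluated on that set.
-- VOCAB = ["rwe", "real-world evidence", "energy", "wind", "power", "renewable",
--          "electricity", "sofia", "offshore", "dogger bank", "turbine",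
--          "raspberry", "solar", "cfd", "belvoir"]
--
--
-- def apply_false_positive_rules(item: dict) -> bool:
--     text = "%s %s" % (item.get('title', ''), item.get('content', ''))
--     text = text.lower()
--     found = set()
--     for i in range(len(text)):
--         for kw in VOCAB:
--             if kw not in found and text.startswith(kw, i):
--                 found.add(kw)
--     if ("rwe" in found and "real-world evidence" in found
--             and found.isdisjoint(("energy", "wind", "power", "renewable", "electricity"))):
--         return False
--     if "sofia" in found and found.isdisjoint(("wind", "rwe", "offshore", "dogger bank", "turbine")):
--         return False
--     if "raspberry" in found and found.isdisjoint(("wind", "rwe", "solar", "energy", "cfd")):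
--         return False
--     if "belvoir" in found and found.isdisjoint(("wind", "rwe", "solar", "energy", "cfd")):
--         return False
--     return True
-- ===== Notes on version B (the rewrite author's own statement) =====
-- stated objective: alternative
-- what changed: Instead of A's keyword-major substring tests (one 'kw in text' search per keyword, special-cased RWE branch plus a dict loop), B makes one position-major scan over the text that collects the set of vocabulary keywords occurring in it (startswith at each index), then evaluates the rules as set-membership/disjointness checks on that set.
import Mathlib
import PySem

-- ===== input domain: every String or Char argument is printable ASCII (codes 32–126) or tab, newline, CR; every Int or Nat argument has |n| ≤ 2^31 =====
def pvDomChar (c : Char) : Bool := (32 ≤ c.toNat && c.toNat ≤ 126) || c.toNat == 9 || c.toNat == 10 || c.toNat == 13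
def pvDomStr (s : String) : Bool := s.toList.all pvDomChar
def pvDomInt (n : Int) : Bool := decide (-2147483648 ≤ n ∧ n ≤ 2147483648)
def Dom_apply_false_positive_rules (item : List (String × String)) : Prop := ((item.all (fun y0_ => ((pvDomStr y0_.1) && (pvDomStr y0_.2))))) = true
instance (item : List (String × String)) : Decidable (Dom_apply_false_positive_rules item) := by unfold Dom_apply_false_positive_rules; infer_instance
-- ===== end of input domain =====

-- B replaces A's per-keyword substring searches by ONE position-major scan of the text
-- that collects the set of vocabulary keywords occurring in it; the rules are then
-- evaluated against that set ('alternative' objective, same asymptotic cost).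

-- ===== PORT A =====
-- the for-loop over the AMBIGUOUS dict's items, early-returning False
def pvALoop (text : String) : List (String × List String) → Bool
  | [] => true
  | (name, qualifiers) :: rest =>
      if PySem.Str.isIn name text && !(qualifiers.any (fun q => PySem.Str.isIn q text)) then
        false
      else pvALoop text rest

def apply_false_positive_rules (item : List (String × String)) : Bool :=
  let text := PySem.Str.lower
    (PySem.Dict.getD (PySem.Dict.mk item) "title" "" ++ " " ++ PySem.Dict.getD (PySem.Dict.mk item) "content" "")
  if PySem.Str.isIn "rwe" text && PySem.Str.isIn "real-world evidence" text &&
     !(["energy", "wind", "power", "renewable", "electricity"].any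
        (fun kw => PySem.Str.isIn kw text)) then
    false
  else
    pvALoop text
      [("sofia", ["wind", "rwe", "offshore", "dogger bank", "turbine"]),
       ("raspberry", ["wind", "rwe", "solar", "energy", "cfd"]),
       ("belvoir", ["wind", "rwe", "solar", "energy", "cfd"])]

-- ===== PORT B =====
def pvVocab : List String :=
  ["rwe", "real-world evidence", "energy", "wind", "power", "renewable",
   "electricity", "sofia", "offshore", "dogger bank", "turbine",
   "raspberry", "solar", "cfd", "belvoir"]

-- text.startswith(kw, i) with 0 ≤ i ≤ len(text): exact — it is 'kw is a prefix of text[i:]'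
def pvStartsAt (cs : List Char) (i : Nat) (kw : String) : Bool :=
  kw.toList.isPrefixOf (cs.drop i)

-- the inner 'for kw in VOCAB' loop body of Source B
def pvScanStep (cs : List Char) (found : List String) (i : Nat) : List String :=
  pvVocab.foldl (fun f kw => if !f.contains kw && pvStartsAt cs i kw then f ++ [kw] else f) found

-- the outer 'for i in range(len(text))' loop of Source B
def pvScan (cs : List Char) : List String :=
  (List.range cs.length).foldl (pvScanStep cs) []

def apply_false_positive_rules_alt (item : List (String × String)) : Bool :=
  let text := PySem.Str.lower
    (PySem.Dict.getD (PySem.Dict.mk item) "title" "" ++ " " ++ PySem.Dict.getD (PySem.Dict.mk item) "content" "")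
  let found := pvScan text.toList
  if found.contains "rwe" && found.contains "real-world evidence" &&
     !(["energy", "wind", "power", "renewable", "electricity"].any found.contains) then
    false
  else if found.contains "sofia" &&
     !(["wind", "rwe", "offshore", "dogger bank", "turbine"].any found.contains) then
    false
  else if found.contains "raspberry" &&
     !(["wind", "rwe", "solar", "energy", "cfd"].any found.contains) then
    false
  else if found.contains "belvoir" &&
     !(["wind", "rwe", "solar", "energy", "cfd"].any found.contains) then
    false
  else
    true

-- ===== PRECONDITION & SPEC =====
def Spec_apply_false_positive_rules (item : List (String × String)) (out : Bool) : Prop := out = apply_false_positive_rules_alt item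
instance (item : List (String × String)) (out : Bool) : Decidable (Spec_apply_false_positive_rules item out) := by unfold Spec_apply_false_positive_rules; infer_instance

-- ===== CLAIM (what is proved, stated in full; the proofs are below) =====
def Claim_equal_apply_false_positive_rules : Prop := ∀ (item : List (String × String)), Dom_apply_false_positive_rules item → Spec_apply_false_positive_rules item (apply_false_positive_rules item)

-- ===== LEMMAS AND PROOFS =====

-- marking loop: kw ends up in the accumulator iff it was there or it is in vs and p kw holds
theorem foldl_mark_contains (p : String → Bool) (vs : List String) (f : List String) (kw : String) :
    ((vs.foldl (fun f k => if !f.contains k && p k then f ++ [k] else f) f).contains kw)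
      = (f.contains kw || (vs.contains kw && p kw)) := by
  induction vs generalizing f with
  | nil => simp
  | cons hd tl ih =>
      simp only [List.foldl_cons, ih, List.contains_cons]
      by_cases hkw : hd = kw
      · subst hkw
        cases hf : f.contains hd <;> cases hp : p hd <;> simp_all
      · have hb : (kw == hd) = false := beq_eq_false_iff_ne.mpr fun h => hkw h.symm
        split_ifs <;> simp [hb, beq_eq_false_iff_ne.mp hb]

theorem contains_scanStep (cs : List Char) (i : Nat) (f : List String) (kw : String) :
    ((pvScanStep cs f i).contains kw)
      = (f.contains kw || (pvVocab.contains kw && pvStartsAt cs i kw)) := by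
  unfold pvScanStep
  exact foldl_mark_contains (pvStartsAt cs i) pvVocab f kw

theorem contains_scan_range (cs : List Char) (kw : String) (n : Nat) :
    (((List.range n).foldl (pvScanStep cs) []).contains kw)
      = (pvVocab.contains kw && decide (∃ i, i < n ∧ pvStartsAt cs i kw = true)) := by
  induction n with
  | zero => simp
  | succ n ih =>
      rw [List.range_succ, List.foldl_append]
      simp only [List.foldl_cons, List.foldl_nil]
      rw [contains_scanStep, ih]
      cases hv : pvVocab.contains kw
      · simp
      · simp only [Bool.true_and]
        have hiff : (∃ i, i < n + 1 ∧ pvStartsAt cs i kw = true)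
            ↔ ((∃ i, i < n ∧ pvStartsAt cs i kw = true) ∨ pvStartsAt cs n kw = true) := by
          constructor
          · rintro ⟨i, hi, hp⟩
            rcases Nat.lt_succ_iff_lt_or_eq.mp hi with h' | rfl
            · exact Or.inl ⟨i, h', hp⟩
            · exact Or.inr hp
          · rintro (⟨i, hi, hp⟩ | hp)
            · exact ⟨i, by omega, hp⟩
            · exact ⟨n, by omega, hp⟩
        by_cases hA : ∃ i, i < n ∧ pvStartsAt cs i kw = true
        · obtain ⟨i, hi, hp⟩ := hA
          have hL : ∃ i, i < n ∧ pvStartsAt cs i kw = true := ⟨i, hi, hp⟩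
          have h2 : ∃ i ≤ n, pvStartsAt cs i kw = true := ⟨i, by omega, hp⟩
          simp [hL, h2]
        · cases hb : pvStartsAt cs n kw
          · have hA' : ¬∃ x, x ≤ n ∧ pvStartsAt cs x kw = true := by
              rintro ⟨x, hx, hpx⟩
              rcases Nat.lt_or_ge x n with h' | h'
              · exact hA ⟨x, h', hpx⟩
              · have hxe : x = n := le_antisymm hx h'
                subst hxe
                rw [hb] at hpx
                cases hpx
            simp [hA, hA']
          · have h2 : ∃ i ≤ n, pvStartsAt cs i kw = true := ⟨n, le_refl n, hb⟩
            simp [hA, h2]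

-- for a nonempty vocabulary keyword, the scan finds kw iff kw is a substring
theorem contains_scan (cs : List Char) (kw : String)
    (hmem : pvVocab.contains kw = true) (hne : kw.toList ≠ []) :
    (pvScan cs).contains kw = PySem.Chars.isIn kw.toList cs := by
  unfold pvScan
  rw [contains_scan_range, hmem, Bool.true_and]
  rcases hin : PySem.Chars.isIn kw.toList cs with _ | _
  · simp only [decide_eq_false_iff_not]
    rintro ⟨i, _, hp⟩
    have : ∃ j, kw.toList <+: cs.drop j := ⟨i, List.isPrefixOf_iff_prefix.mp hp⟩
    rw [PySem.Chars.exists_prefix_drop_iff_isIn] at this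
    simp [hin] at this
  · simp only [decide_eq_true_iff]
    have := (PySem.Chars.exists_prefix_drop_iff_isIn (sub := kw.toList) (s := cs)).mpr hin
    obtain ⟨j, hj⟩ := this
    refine ⟨j, ?_, List.isPrefixOf_iff_prefix.mpr hj⟩
    by_contra h
    have hdrop : cs.drop j = [] := List.drop_eq_nil_of_le (by omega)
    rw [hdrop] at hj
    exact hne (List.prefix_nil.mp hj)

-- A's early-return loop equals the negation of "some ambiguous rule fires"
theorem pvALoop_eq_not_any (text : String) (L : List (String × List String)) :
    pvALoop text L
      = !(L.any (fun p => PySem.Str.isIn p.1 text && !(p.2.any (fun q => PySem.Str.isIn q text)))) := by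
  induction L with
  | nil => rfl
  | cons hd tl ih =>
      obtain ⟨name, qs⟩ := hd
      simp only [pvALoop, List.any_cons]
      cases h1 : PySem.Str.isIn name text <;>
      cases h2 : qs.any (fun q => PySem.Str.isIn q text) <;>
      simp [ih]

-- ===== VERDICT (by name: the statement is the Claim_ definition above) =====
theorem apply_false_positive_rules_spec : Claim_equal_apply_false_positive_rules := by
  intro item _
  unfold Spec_apply_false_positive_rules
  unfold apply_false_positive_rules apply_false_positive_rules_alt
  generalize PySem.Str.lower
    (PySem.Dict.getD (PySem.Dict.mk item) "title" "" ++ " " ++ PySem.Dict.getD (PySem.Dict.mk item) "content" "") = t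
  simp only [pvALoop_eq_not_any, List.any_cons, List.any_nil,
    contains_scan t.toList "rwe" (by decide) (by decide),
    contains_scan t.toList "real-world evidence" (by decide) (by decide),
    contains_scan t.toList "energy" (by decide) (by decide),
    contains_scan t.toList "wind" (by decide) (by decide),
    contains_scan t.toList "power" (by decide) (by decide),
    contains_scan t.toList "renewable" (by decide) (by decide),
    contains_scan t.toList "electricity" (by decide) (by decide),
    contains_scan t.toList "sofia" (by decide) (by decide),
    contains_scan t.toList "offshore" (by decide) (by decide),
    contains_scan t.toList "dogger bank" (by decide) (by decide),
    contains_scan t.toList "turbine" (by decide) (by decide),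
    contains_scan t.toList "raspberry" (by decide) (by decide),
    contains_scan t.toList "solar" (by decide) (by decide),
    contains_scan t.toList "cfd" (by decide) (by decide),
    contains_scan t.toList "belvoir" (by decide) (by decide),
    PySem.Str.isIn_eq]
  cases h1 : PySem.Chars.isIn "rwe".toList t.toList <;>
  cases h2 : PySem.Chars.isIn "real-world evidence".toList t.toList <;>
  cases h3 : PySem.Chars.isIn "energy".toList t.toList <;>
  cases h4 : PySem.Chars.isIn "wind".toList t.toList <;>
  cases h5 : PySem.Chars.isIn "power".toList t.toList <;>
  cases h6 : PySem.Chars.isIn "renewable".toList t.toList <;>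
  cases h7 : PySem.Chars.isIn "electricity".toList t.toList <;>
  simp
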